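-- pv_equiv track=rewrite | github.com/xiasma/evagene-integration-examples | research-cohort-anonymiser/python/src/research_anonymiser/generation_assigner.py | _assign_generations
-- ===== SOURCE A (Python) =====
-- from collections import deque
--
-- def _assign_generations(
--     individual_ids: list[str],
--     parents_of: dict[str, list[str]],
-- ) -> dict[str, int | None]:
--     generations: dict[str, int | None] = dict.fromkeys(individual_ids)
--     queue: deque[str] = deque()
--     for individual_id in individual_ids:
--         if not parents_of.get(individual_id):
--             generations[individual_id] = 0
--             queue.append(individual_id)
--
--     while queue:
--         current = queue.popleft()
--         current_generation = generations[current]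
--         if current_generation is None:
--             continue
--         for individual_id in individual_ids:
--             if current not in parents_of.get(individual_id, []):
--                 continue
--             parent_generations: list[int] = [
--                 value
--                 for parent in parents_of[individual_id]
--                 if (value := generations.get(parent)) is not None
--             ]
--             if len(parent_generations) != len(parents_of[individual_id]):
--                 continue
--             candidate = max(parent_generations) + 1
--             existing = generations[individual_id]
--             if existing is None or candidate > existing:
--                 generations[individual_id] = candidate
--                 queue.append(individual_id)
--
--     return generations
-- ===== SOURCE B (Python) =====
-- def _assign_generations(
--     individual_ids: list[str],
--     parents_of: dict[str, list[str]],
-- ) -> dict[str, int | None]: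
--     # Round-based (Bellman-Ford style) longest-path iteration with early exit,
--     # instead of A's queue-driven worklist with an O(N) scan per pop.
--     order = list(dict.fromkeys(individual_ids))
--
--     def step(g, i):
--         ps = parents_of.get(i)
--         if not ps:
--             return 0
--         vals = []
--         for p in ps:
--             v = g.get(p)
--             if v is None:
--                 return None
--             vals.append(v)
--         return max(vals) + 1
--
--     g = {i: (0 if not parents_of.get(i) else None) for i in order}
--     for _ in range(len(order)):
--         new = {i: step(g, i) for i in order}
--         if new == g:
--             break
--         g = new
--     return g
-- ===== Notes on version B (the rewrite author's own statement) =====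
-- stated objective: faster
-- what changed: A relaxes via a worklist queue and rescans all N individuals on every pop to find children; B instead runs synchronous Bellman-Ford-style rounds over the (deduplicated) individuals, recomputing each generation from its parents and stopping as soon as a round changes nothing.
import Mathlib
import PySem

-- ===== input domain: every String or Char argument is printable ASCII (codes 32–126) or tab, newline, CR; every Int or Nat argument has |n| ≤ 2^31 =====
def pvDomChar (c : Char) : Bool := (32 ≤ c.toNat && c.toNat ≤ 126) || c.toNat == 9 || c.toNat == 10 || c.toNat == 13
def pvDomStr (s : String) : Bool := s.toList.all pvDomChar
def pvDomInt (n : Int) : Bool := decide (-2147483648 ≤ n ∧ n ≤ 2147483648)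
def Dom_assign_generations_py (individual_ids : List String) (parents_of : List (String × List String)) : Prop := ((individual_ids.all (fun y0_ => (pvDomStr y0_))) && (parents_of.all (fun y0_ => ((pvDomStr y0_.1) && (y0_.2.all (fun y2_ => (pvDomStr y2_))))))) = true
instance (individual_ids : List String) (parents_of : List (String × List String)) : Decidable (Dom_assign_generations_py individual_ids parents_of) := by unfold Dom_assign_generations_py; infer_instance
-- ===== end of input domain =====

-- B replaces A's queue-driven worklist (which rescans every individual on each pop) by
-- synchronous rounds that recompute every generation from its parents until stable.


-- ===== PORT A =====
-- body of A's inner 'for individual_id in individual_ids' scan; state = (generations, queue)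
def pvStepA (pd : PySem.Dict String (List String)) (current : String)
    (s : PySem.Dict String (Option Int) × List String) (i : String) :
    PySem.Dict String (Option Int) × List String :=
  if current ∈ (pd.get? i).getD [] then
    let ps := (pd.get? i).getD []   -- parents_of[i]: the key exists since current ∈ parents_of.get(i, [])
    let pgens := ps.filterMap (fun p => s.1.getD p none)
    if pgens.length = ps.length then
      match PySem.List.max? pgens (fun v => v) with
      | none => s    -- unreachable: ps ≠ [] (current ∈ ps) and pgens.length = ps.length
      | some m =>
        let candidate := m + 1
        match s.1.getD i none with   -- generations[individual_id]: key exists (i ∈ individual_ids)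
        | none => (s.1.insert i (some candidate), s.2 ++ [i])
        | some existing =>
            if candidate > existing then (s.1.insert i (some candidate), s.2 ++ [i]) else s
    else s
  else s

-- A's 'while queue:' loop; the fuel passed below is proven sufficient (the loop terminates)
def pvWhileA (pd : PySem.Dict String (List String)) (ids : List String) :
    Nat → PySem.Dict String (Option Int) → List String → PySem.Dict String (Option Int)
  | 0, g, _ => g
  | _ + 1, g, [] => g
  | fuel + 1, g, current :: rest =>
    match g.getD current none with   -- generations[current]: queue members are keys
    | none => pvWhileA pd ids fuel g rest
    | some _ =>
      let s := ids.foldl (pvStepA pd current) (g, rest)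
      pvWhileA pd ids fuel s.1 s.2

def assign_generations_py (individual_ids : List String)
    (parents_of : List (String × List String)) : List (String × Option Int) :=
  let pd := PySem.Dict.mk parents_of
  let init := individual_ids.foldl
    (fun (s : PySem.Dict String (Option Int) × List String) i =>
      if ((pd.get? i).getD []).isEmpty then (s.1.insert i (some 0), s.2 ++ [i]) else s)
    (PySem.Dict.mk ((PySem.List.dedup individual_ids).map (fun i => (i, (none : Option Int)))), [])
  let d := (PySem.List.dedup individual_ids).length
  (pvWhileA pd individual_ids (2 * d * (d + 1) + individual_ids.length + 1) init.1 init.2).items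

-- ===== PORT B =====
def pvStepB (pd : PySem.Dict String (List String))
    (g : PySem.Dict String (Option Int)) (i : String) : Option Int :=
  let ps := (pd.get? i).getD []
  if ps.isEmpty then some 0
  else if ps.all (fun p => (g.getD p none).isSome) then
    match PySem.List.max? (ps.filterMap (fun p => g.getD p none)) (fun v => v) with
    | none => none   -- unreachable: ps ≠ []
    | some m => some (m + 1)
  else none

def pvRoundsB (pd : PySem.Dict String (List String)) (order : List String) :
    Nat → PySem.Dict String (Option Int) → PySem.Dict String (Option Int)
  | 0, g => g
  | k + 1, g =>
    let ng := PySem.Dict.mk (order.map (fun i => (i, pvStepB pd g i)))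
    -- Python's 'new == g': both dicts have the identical key sequence, so item-list equality is exact
    if ng == g then g else pvRoundsB pd order k ng

def assign_generations_py_alt (individual_ids : List String)
    (parents_of : List (String × List String)) : List (String × Option Int) :=
  let pd := PySem.Dict.mk parents_of
  let order := PySem.List.dedup individual_ids
  let g0 := PySem.Dict.mk (order.map (fun i =>
    (i, if ((pd.get? i).getD []).isEmpty then some (0 : Int) else none)))
  (pvRoundsB pd order order.length g0).items

-- ===== PRECONDITION & SPEC =====
def Spec_assign_generations_py (individual_ids : List String) (parents_of : List (String × List String)) (out : List (String × Option Int)) : Prop := out = assign_generations_py_alt individual_ids parents_of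
instance (individual_ids : List String) (parents_of : List (String × List String)) (out : List (String × Option Int)) : Decidable (Spec_assign_generations_py individual_ids parents_of out) := by unfold Spec_assign_generations_py; infer_instance

-- ===== CLAIM (what is proved, stated in full; the proofs are below) =====
def Claim_equal_assign_generations_py : Prop := ∀ (individual_ids : List String) (parents_of : List (String × List String)), Dom_assign_generations_py individual_ids parents_of → Spec_assign_generations_py individual_ids parents_of (assign_generations_py individual_ids parents_of)

-- ===== LEMMAS AND PROOFS =====

-- parent list of i (both programs read parents_of.get(i) and default the missing key to [])
def pvP (pd : PySem.Dict String (List String)) (i : String) : List String :=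
  (pd.get? i).getD []

-- one synchronous relaxation layer: recompute i's generation from layer f
def pvF (pd : PySem.Dict String (List String)) (dids : List String)
    (f : String → Option Int) (i : String) : Option Int :=
  if pvP pd i = [] then some 0
  else if (pvP pd i).all (fun p => decide (p ∈ dids) && (f p).isSome) then
    some (1 + ((pvP pd i).map (fun p => (f p).getD 0)).foldl max 0)
  else none

-- layered longest-path values: pvLp k = k-fold relaxation from ⊥
def pvLp (pd : PySem.Dict String (List String)) (dids : List String) : Nat → String → Option Int
  | 0 => pvF pd dids (fun _ => none)
  | k + 1 => pvF pd dids (pvLp pd dids k)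

-- the common answer of both programs
def pvGstar (pd : PySem.Dict String (List String)) (dids : List String) : String → Option Int :=
  pvLp pd dids dids.length

def pvGv (g : PySem.Dict String (Option Int)) (i : String) : Option Int := g.getD i none

def pvCand (pd : PySem.Dict String (List String)) (g : PySem.Dict String (Option Int))
    (i : String) : Int :=
  1 + ((pvP pd i).map (fun p => (pvGv g p).getD 0)).foldl max 0

-- i's stored value can still be improved from its (fully known) parents
def pvViolated (pd : PySem.Dict String (List String)) (g : PySem.Dict String (Option Int))
    (i : String) : Prop :=
  pvP pd i ≠ [] ∧ (∀ p ∈ pvP pd i, (pvGv g p).isSome) ∧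
    (pvGv g i = none ∨ ∃ v, pvGv g i = some v ∧ v < pvCand pd g i)

-- run invariant of A's while-loop
structure PvInv (pd : PySem.Dict String (List String)) (dids : List String)
    (g : PySem.Dict String (Option Int)) (q : List String) : Prop where
  keys : g.keys = dids
  ubound : ∀ i v, pvGv g i = some v → ∃ w, pvGstar pd dids i = some w ∧ v ≤ w
  nonneg : ∀ i v, pvGv g i = some v → 0 ≤ v
  root0 : ∀ i ∈ dids, pvP pd i = [] → pvGv g i = some 0
  qmem : ∀ p ∈ q, (pvGv g p).isSome
  cover : ∀ i ∈ dids, pvViolated pd g i → ∃ p ∈ pvP pd i, p ∈ q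

-- termination potential
def pvCap (pd : PySem.Dict String (List String)) (dids : List String) (i : String) : Nat :=
  match pvGstar pd dids i with
  | some w => (w + 1).toNat
  | none => 0

def pvCur (g : PySem.Dict String (Option Int)) (i : String) : Nat :=
  match pvGv g i with
  | some v => (v + 1).toNat
  | none => 0

def pvPotSum (pd : PySem.Dict String (List String)) (dids : List String)
    (g : PySem.Dict String (Option Int)) : Nat :=
  (dids.map (fun i => pvCap pd dids i - pvCur g i)).sum
-- lp layer lemmas
theorem pvF_congr (pd : PySem.Dict String (List String)) (dids : List String)
    {f f' : String → Option Int} (h : ∀ p ∈ dids, f p = f' p) (i : String) :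
    pvF pd dids f i = pvF pd dids f' i := by
  unfold pvF
  by_cases hr : pvP pd i = []
  · simp [hr]
  · simp only [hr, if_false]
    have hall : (pvP pd i).all (fun p => decide (p ∈ dids) && (f p).isSome)
        = (pvP pd i).all (fun p => decide (p ∈ dids) && (f' p).isSome) := by
      apply List.all_congr rfl
      intro p
      by_cases hp : p ∈ dids
      · simp [hp, h p hp]
      · simp [hp]
    rw [hall]
    by_cases hb : (pvP pd i).all (fun p => decide (p ∈ dids) && (f' p).isSome) = true
    · simp only [hb, if_true]
      have hmap : (pvP pd i).map (fun p => (f p).getD 0)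
          = (pvP pd i).map (fun p => (f' p).getD 0) := by
        apply List.map_congr_left
        intro p hp
        have := (List.all_eq_true.mp hb) p hp
        have hpd : p ∈ dids := by
          by_contra hc
          simp [hc] at this
        rw [h p hpd]
      rw [hmap]
    · simp [hb]

theorem pvF_mono (pd : PySem.Dict String (List String)) (dids : List String)
    {f f' : String → Option Int} (h : ∀ p ∈ dids, ∀ v, f p = some v → f' p = some v)
    (i : String) (v : Int) (hv : pvF pd dids f i = some v) : pvF pd dids f' i = some v := by
  unfold pvF at hv ⊢
  by_cases hr : pvP pd i = []
  · simpa [hr] using hv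
  · simp only [hr, if_false] at hv ⊢
    by_cases hb : (pvP pd i).all (fun p => decide (p ∈ dids) && (f p).isSome) = true
    · have hmem : ∀ p ∈ pvP pd i, p ∈ dids ∧ ∃ w, f p = some w := by
        intro p hp
        have := (List.all_eq_true.mp hb) p hp
        by_cases hpd : p ∈ dids
        · refine ⟨hpd, ?_⟩
          simp only [hpd, decide_true, Bool.true_and] at this
          exact Option.isSome_iff_exists.mp this
        · simp [hpd] at this
      have hb' : (pvP pd i).all (fun p => decide (p ∈ dids) && (f' p).isSome) = true := by
        apply List.all_eq_true.mpr
        intro p hp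
        obtain ⟨hpd, w, hw⟩ := hmem p hp
        have := h p hpd w hw
        simp [hpd, this]
      have hmap : (pvP pd i).map (fun p => (f p).getD 0)
          = (pvP pd i).map (fun p => (f' p).getD 0) := by
        apply List.map_congr_left
        intro p hp
        obtain ⟨hpd, w, hw⟩ := hmem p hp
        rw [hw, h p hpd w hw]
      simp only [hb, if_true] at hv
      rw [hb', if_pos rfl, ← hmap]
      exact hv
    · simp [hb] at hv

theorem pvLp_mono_succ (pd : PySem.Dict String (List String)) (dids : List String) :
    ∀ k i v, pvLp pd dids k i = some v → pvLp pd dids (k + 1) i = some v := by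
  intro k
  induction k with
  | zero =>
    intro i v hv
    exact pvF_mono pd dids (by intro p _ v h; simp at h) i v hv
  | succ k ih =>
    intro i v hv
    exact pvF_mono pd dids (fun p _ v h => ih p v h) i v hv

-- foldl-max toolbox
theorem pvFoldlMax_le (l : List Int) (c : Int) : ∀ a : Int, (∀ x ∈ l, x ≤ c) → a ≤ c →
    l.foldl max a ≤ c := by
  induction l with
  | nil => intro a _ ha; simpa using ha
  | cons x t ih =>
    intro a h ha
    exact ih (max a x) (fun y hy => h y (List.mem_cons_of_mem _ hy))
      (max_le ha (h x (List.mem_cons_self)))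

theorem pvFoldlMax_mono (ps : List String) (f h : String → Int)
    (hfh : ∀ p ∈ ps, f p ≤ h p) : ∀ a b : Int, a ≤ b →
    (ps.map f).foldl max a ≤ (ps.map h).foldl max b := by
  induction ps with
  | nil => intro a b hab; simpa using hab
  | cons x t ih =>
    intro a b hab
    simp only [List.map_cons, List.foldl_cons]
    exact ih (fun p hp => hfh p (List.mem_cons_of_mem _ hp)) _ _
      (max_le_max hab (hfh x (List.mem_cons_self)))

theorem pvLp_bounds (pd : PySem.Dict String (List String)) (dids : List String) :
    ∀ k i v, pvLp pd dids k i = some v → 0 ≤ v ∧ v ≤ (k : Int) := by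
  intro k
  induction k with
  | zero =>
    intro i v hv
    unfold pvLp pvF at hv
    by_cases hr : pvP pd i = []
    · simp [hr] at hv; omega
    · simp [hr] at hv
      obtain ⟨x, hx⟩ := List.exists_mem_of_ne_nil _ hr
      exact absurd hx (hv.1 x)
  | succ k ih =>
    intro i v hv
    unfold pvLp pvF at hv
    by_cases hr : pvP pd i = []
    · simp [hr] at hv; omega
    · simp only [hr, if_false] at hv
      by_cases hb : (pvP pd i).all (fun p => decide (p ∈ dids) && (pvLp pd dids k p).isSome) = true
      · simp only [hb, if_true, Option.some.injEq] at hv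
        have hle : ((pvP pd i).map (fun p => (pvLp pd dids k p).getD 0)).foldl max 0 ≤ (k : Int) := by
          apply pvFoldlMax_le
          · intro x hx
            obtain ⟨p, hp, rfl⟩ := List.mem_map.mp hx
            cases hlp : pvLp pd dids k p with
            | none => simp
            | some w =>
              have := (ih p w hlp).2
              simpa [hlp] using this
          · omega
        have hge : (0 : Int) ≤ ((pvP pd i).map (fun p => (pvLp pd dids k p).getD 0)).foldl max 0 :=
          (PySem.List.le_foldl_max _ _).1
        omega
      · simp [hb] at hv

-- stability propagation
theorem pvStable_step (pd : PySem.Dict String (List String)) (dids : List String) (k : Nat)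
    (h : ∀ i ∈ dids, pvLp pd dids (k + 1) i = pvLp pd dids k i) :
    ∀ i ∈ dids, pvLp pd dids (k + 2) i = pvLp pd dids (k + 1) i := by
  intro i _
  show pvF pd dids (pvLp pd dids (k + 1)) i = pvF pd dids (pvLp pd dids k) i
  exact pvF_congr pd dids (fun p hp => h p hp) i

theorem pvStable_add (pd : PySem.Dict String (List String)) (dids : List String) (k : Nat)
    (h : ∀ i ∈ dids, pvLp pd dids (k + 1) i = pvLp pd dids k i) :
    ∀ m, ∀ i ∈ dids, pvLp pd dids (k + m) i = pvLp pd dids k i := by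
  intro m
  induction m with
  | zero => intro i _; rfl
  | succ m ih =>
    have hstab : ∀ j, (∀ i ∈ dids, pvLp pd dids (k + j + 1) i = pvLp pd dids (k + j) i) := by
      intro j
      induction j with
      | zero => exact h
      | succ j ihj => exact pvStable_step pd dids (k + j) ihj
    intro i hi
    calc pvLp pd dids (k + (m + 1)) i = pvLp pd dids (k + m) i := hstab m i hi
    _ = pvLp pd dids k i := ih i hi

-- strict countP growth (specific helper for the stabilization count)
theorem pvCountP_lt (l : List String) (p q : String → Bool)
    (hmono : ∀ x ∈ l, p x = true → q x = true) :
    ∀ x0 ∈ l, p x0 = false → q x0 = true → l.countP p < l.countP q := by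
  induction l with
  | nil => intro x0 h; simp at h
  | cons y t ih =>
    intro x0 hx0 hp hq
    rcases List.mem_cons.mp hx0 with rfl | hmem
    · have hle : t.countP p ≤ t.countP q :=
        List.countP_mono_left (fun x hx => hmono x (List.mem_cons_of_mem _ hx))
      simp [List.countP_cons, hp, hq]
      omega
    · have hlt := ih (fun x hx => hmono x (List.mem_cons_of_mem _ hx)) x0 hmem hp hq
      by_cases hy : p y = true
      · simp [List.countP_cons, hy, hmono y List.mem_cons_self hy]
        omega
      · simp only [Bool.not_eq_true] at hy
        simp [List.countP_cons, hy]
        split <;> omega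

theorem pvStabilized (pd : PySem.Dict String (List String)) (dids : List String) :
    ∀ i ∈ dids, pvLp pd dids (dids.length + 1) i = pvLp pd dids dids.length i := by
  by_cases hex : ∃ k ≤ dids.length, ∀ i ∈ dids, pvLp pd dids (k + 1) i = pvLp pd dids k i
  · obtain ⟨k, hk, hst⟩ := hex
    intro i hi
    obtain ⟨m, hm⟩ := Nat.exists_eq_add_of_le hk
    rw [hm]
    calc pvLp pd dids (k + m + 1) i = pvLp pd dids k i := by
          have := pvStable_add pd dids k hst (m + 1) i hi
          simpa [Nat.add_assoc] using this
    _ = pvLp pd dids (k + m) i := (pvStable_add pd dids k hst m i hi).symm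
  · exfalso
    push_neg at hex
    have hcount : ∀ k ≤ dids.length + 1,
        k ≤ dids.countP (fun i => (pvLp pd dids k i).isSome) := by
      intro k
      induction k with
      | zero => intro _; omega
      | succ k ihk =>
        intro hk
        obtain ⟨i, hi, hne⟩ := hex k (by omega)
        have hknone : pvLp pd dids k i = none := by
          cases hlp : pvLp pd dids k i with
          | none => rfl
          | some v => exact absurd (pvLp_mono_succ pd dids k i v hlp) (by rw [hlp] at hne; exact hne)
        have hsome : (pvLp pd dids (k + 1) i).isSome = true := by
          cases hlp : pvLp pd dids (k + 1) i with
          | none => rw [hlp, hknone] at hne; exact absurd rfl hne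
          | some v => rfl
        have hlt : dids.countP (fun i => (pvLp pd dids k i).isSome)
            < dids.countP (fun i => (pvLp pd dids (k + 1) i).isSome) := by
          apply pvCountP_lt dids _ _ ?_ i hi (by simp [hknone]) hsome
          intro x _ hx
          obtain ⟨v, hv⟩ := Option.isSome_iff_exists.mp hx
          simp [pvLp_mono_succ pd dids k x v hv]
        have := ihk (by omega)
        omega
    have h1 := hcount (dids.length + 1) (le_refl _)
    have h2 := List.countP_le_length (l := dids)
      (p := fun i => (pvLp pd dids (dids.length + 1) i).isSome)
    omega

theorem pvGstar_fix (pd : PySem.Dict String (List String)) (dids : List String) :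
    ∀ i ∈ dids, pvF pd dids (pvGstar pd dids) i = pvGstar pd dids i :=
  pvStabilized pd dids
-- B-side
theorem pvGet?_mkmap (xs : List String) (h : String → Option Int) (p : String) :
    (PySem.Dict.mk (xs.map (fun i => (i, h i)))).get? p = if p ∈ xs then some (h p) else none := by
  induction xs with
  | nil => simp [PySem.Dict.get?]
  | cons x t ih =>
    simp only [List.map_cons]
    rw [PySem.Dict.get?_mk_cons]
    by_cases hx : x = p
    · subst hx; simp
    · simp only [beq_iff_eq, hx, if_false, ih, List.mem_cons]
      by_cases hp : p ∈ t
      · simp [hp]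
      · simp [hp, Ne.symm hx]

theorem pvGv_mkmap (xs : List String) (h : String → Option Int) (p : String) :
    pvGv (PySem.Dict.mk (xs.map (fun i => (i, h i)))) p = if p ∈ xs then h p else none := by
  unfold pvGv
  rw [PySem.Dict.getD_eq_get?_getD, pvGet?_mkmap]
  by_cases hp : p ∈ xs <;> simp [hp]

theorem pvFilterMap_all_some (ps : List String) (gv : String → Option Int)
    (h : ∀ p ∈ ps, (gv p).isSome) :
    ps.filterMap gv = ps.map (fun p => (gv p).getD 0) := by
  induction ps with
  | nil => rfl
  | cons x t ih =>
    obtain ⟨v, hv⟩ := Option.isSome_iff_exists.mp (h x List.mem_cons_self)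
    simp only [List.filterMap_cons, hv, List.map_cons]
    rw [ih (fun p hp => h p (List.mem_cons_of_mem _ hp))]
    simp

theorem pvMaxBridge (ps : List String) (gv : String → Option Int) (hne : ps ≠ [])
    (h : ∀ p ∈ ps, ∃ v, gv p = some v ∧ 0 ≤ v) :
    PySem.List.max? (ps.filterMap gv) (fun v => v)
      = some ((ps.map (fun p => (gv p).getD 0)).foldl max 0) := by
  rw [pvFilterMap_all_some ps gv (fun p hp => by obtain ⟨v, hv, _⟩ := h p hp; simp [hv])]
  cases hps : ps with
  | nil => exact absurd hps hne
  | cons x t =>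
    obtain ⟨v, hv, hv0⟩ := h x (hps ▸ List.mem_cons_self)
    simp only [List.map_cons, PySem.List.max?_id_cons, List.foldl_cons, Option.some.injEq]
    congr 1
    have : max (0 : Int) ((gv x).getD 0) = (gv x).getD 0 := by
      rw [hv]; simpa using hv0
    rw [this]

theorem pvStepB_eq (pd : PySem.Dict String (List String)) (dids : List String)
    (g : PySem.Dict String (Option Int)) (f : String → Option Int)
    (hg : ∀ p, pvGv g p = if p ∈ dids then f p else none)
    (hnn : ∀ p v, f p = some v → 0 ≤ v) (i : String) :
    pvStepB pd g i = pvF pd dids f i := by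
  unfold pvStepB pvF
  simp only [pvP]
  by_cases hr : (pd.get? i).getD [] = []
  · simp [hr]
  · have hni : ((pd.get? i).getD []).isEmpty = false := by
      simpa [List.isEmpty_iff] using hr
    simp only [hni, Bool.false_eq_true, if_false, hr]
    have hall : ((pd.get? i).getD []).all (fun p => (g.getD p none).isSome)
        = ((pd.get? i).getD []).all (fun p => decide (p ∈ dids) && (f p).isSome) := by
      apply List.all_congr rfl
      intro p
      have hgp := hg p
      unfold pvGv at hgp
      by_cases hp : p ∈ dids <;> simp [hp] at hgp <;> simp [hp, hgp]
    rw [hall]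
    by_cases hb : ((pd.get? i).getD []).all (fun p => decide (p ∈ dids) && (f p).isSome) = true
    · simp only [hb, if_true]
      have hno : ∀ p ∈ (pd.get? i).getD [], ∃ v, g.getD p none = some v ∧ 0 ≤ v := by
        intro p hp
        have hx := List.all_eq_true.mp hb p hp
        by_cases hpd : p ∈ dids
        · simp only [hpd, decide_true, Bool.true_and] at hx
          obtain ⟨v, hv⟩ := Option.isSome_iff_exists.mp hx
          have hgp := hg p
          unfold pvGv at hgp
          rw [hgp, if_pos hpd]
          exact ⟨v, hv, hnn p v hv⟩
        · simp [hpd] at hx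
      rw [pvMaxBridge _ _ hr hno]
      have hmap : ((pd.get? i).getD []).map (fun p => (g.getD p none).getD 0)
          = ((pd.get? i).getD []).map (fun p => (f p).getD 0) := by
        apply List.map_congr_left
        intro p hp
        have hx := List.all_eq_true.mp hb p hp
        by_cases hpd : p ∈ dids
        · have hgp := hg p
          unfold pvGv at hgp
          rw [hgp, if_pos hpd]
        · simp [hpd] at hx
      dsimp only
      rw [hmap]
      simp only [Option.some.injEq]
      ring
    · simp [hb]

theorem pvMapPairs_inj (xs : List String) (f g : String → Option Int)
    (h : xs.map (fun i => (i, f i)) = xs.map (fun i => (i, g i))) :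
    ∀ i ∈ xs, f i = g i := by
  induction xs with
  | nil => intro i hi; simp at hi
  | cons x t ih =>
    simp only [List.map_cons, List.cons.injEq, Prod.mk.injEq] at h
    intro i hi
    rcases List.mem_cons.mp hi with rfl | hmem
    · exact h.1.2
    · exact ih h.2 i hmem

theorem pvLp_zero (pd : PySem.Dict String (List String)) (dids : List String) (i : String) :
    pvLp pd dids 0 i = if pvP pd i = [] then some 0 else none := by
  unfold pvLp pvF
  by_cases hr : pvP pd i = []
  · simp [hr]
  · simp only [hr, if_false]
    obtain ⟨x, hx⟩ := List.exists_mem_of_ne_nil _ hr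
    have : ¬((pvP pd i).all (fun p => decide (p ∈ dids) && (none : Option Int).isSome) = true) := by
      intro hc
      simpa using List.all_eq_true.mp hc x hx
    simp
    exact ⟨x, hx⟩

theorem pvRoundsB_items (pd : PySem.Dict String (List String)) (dids : List String) :
    ∀ (r k : Nat) (g : PySem.Dict String (Option Int)),
    g = PySem.Dict.mk (dids.map (fun i => (i, pvLp pd dids k i))) →
    (pvRoundsB pd dids r g).items = dids.map (fun i => (i, pvLp pd dids (k + r) i)) := by
  intro r
  induction r with
  | zero => intro k g hg; subst hg; rfl
  | succ r ih =>
    intro k g hg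
    have hgv : ∀ p, pvGv g p = if p ∈ dids then pvLp pd dids k p else none := by
      intro p; rw [hg]; exact pvGv_mkmap dids _ p
    have hstep : ∀ i, pvStepB pd g i = pvLp pd dids (k + 1) i := by
      intro i
      exact pvStepB_eq pd dids g (pvLp pd dids k) hgv
        (fun p v hv => (pvLp_bounds pd dids k p v hv).1) i
    unfold pvRoundsB
    have hmapstep : dids.map (fun i => (i, pvStepB pd g i))
        = dids.map (fun i => (i, pvLp pd dids (k + 1) i)) :=
      List.map_congr_left (fun i _ => by rw [hstep i])
    rw [hmapstep]
    by_cases heq : (PySem.Dict.mk (dids.map (fun i => (i, pvLp pd dids (k + 1) i))) == g) = true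
    · simp only [heq, if_true]
      have hitems : dids.map (fun i => (i, pvLp pd dids (k + 1) i))
          = dids.map (fun i => (i, pvLp pd dids k i)) := by
        have hbeq : ((PySem.Dict.mk (dids.map (fun i => (i, pvLp pd dids (k + 1) i)))).items
            == g.items) = true := heq
        have := eq_of_beq hbeq
        rw [hg] at this
        exact this
      have hstab := pvMapPairs_inj dids _ _ hitems
      have hadd := pvStable_add pd dids k hstab (r + 1)
      rw [hg]
      show dids.map (fun i => (i, pvLp pd dids k i)) = _
      apply List.map_congr_left
      intro i hi
      simp [(hadd i hi).symm]
    · simp only [heq, Bool.false_eq_true, if_false]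
      have hrec := ih (k + 1) (PySem.Dict.mk (dids.map (fun i => (i, pvLp pd dids (k + 1) i)))) rfl
      rw [hrec]
      have harith : k + 1 + r = k + (r + 1) := by omega
      rw [harith]

theorem pvAltChar (individual_ids : List String) (parents_of : List (String × List String)) :
    assign_generations_py_alt individual_ids parents_of
      = (PySem.List.dedup individual_ids).map (fun i =>
          (i, pvGstar (PySem.Dict.mk parents_of) (PySem.List.dedup individual_ids) i)) := by
  show (pvRoundsB (PySem.Dict.mk parents_of) (PySem.List.dedup individual_ids)
      (PySem.List.dedup individual_ids).length
      (PySem.Dict.mk ((PySem.List.dedup individual_ids).map (fun i =>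
        (i, if (((PySem.Dict.mk parents_of).get? i).getD []).isEmpty then some (0 : Int)
            else none))))).items = _
  set pd := PySem.Dict.mk parents_of with hpd
  set dids := PySem.List.dedup individual_ids with hdids
  have hg0 : PySem.Dict.mk (dids.map (fun i =>
      (i, if ((pd.get? i).getD []).isEmpty then some (0 : Int) else none)))
      = PySem.Dict.mk (dids.map (fun i => (i, pvLp pd dids 0 i))) := by
    congr 1
    apply List.map_congr_left
    intro i _
    rw [pvLp_zero]
    by_cases hr : pvP pd i = []
    · simp only [pvP] at hr
      simp [pvP, hr]
    · have hni : ((pd.get? i).getD []).isEmpty = false := by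
        simpa [pvP, List.isEmpty_iff] using hr
      simp only [pvP] at hr
      simp [hni, pvP, hr]
  rw [hg0, pvRoundsB_items pd dids dids.length 0 _ rfl, Nat.zero_add]
  rfl
-- A-side basics
theorem pvGv_insert (g : PySem.Dict String (Option Int)) (i : String) (v : Option Int)
    (p : String) : pvGv (g.insert i v) p = if p = i then v else pvGv g p := by
  unfold pvGv
  rw [PySem.Dict.getD_insert]

theorem pvGv_none_of_not_mem (g : PySem.Dict String (Option Int)) (dids : List String)
    (hkeys : g.keys = dids) (p : String) (hp : p ∉ dids) : pvGv g p = none := by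
  unfold pvGv
  apply PySem.Dict.getD_of_not_contains
  rw [← Bool.not_eq_true, PySem.Dict.contains_iff_mem_keys, hkeys]
  exact hp

theorem pvMem_of_pvGv_some (g : PySem.Dict String (Option Int)) (dids : List String)
    (hkeys : g.keys = dids) (p : String) (h : (pvGv g p).isSome) : p ∈ dids := by
  by_contra hc
  rw [pvGv_none_of_not_mem g dids hkeys p hc] at h
  simp at h

theorem pvFilterMapLen (ps : List String) (gv : String → Option Int) :
    (ps.filterMap gv).length = ps.length ↔ ∀ p ∈ ps, (gv p).isSome := by
  constructor
  · intro h p hp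
    by_contra hc
    have hnone : gv p = none := by
      cases hgv : gv p with
      | none => rfl
      | some v => rw [hgv] at hc; simp at hc
    -- length strictly less
    have hlt : (ps.filterMap gv).length < ps.length := by
      clear h
      induction ps with
      | nil => simp at hp
      | cons x t ih =>
        rcases List.mem_cons.mp hp with rfl | hmem
        · simp only [List.filterMap_cons, hnone]
          have := List.length_filterMap_le gv t
          simp only [List.length_cons]
          omega
        · simp only [List.filterMap_cons]
          cases gv x with
          | none =>
            have := ih hmem
            simp only [List.length_cons]
            omega
          | some v =>
            have := ih hmem
            simp only [List.length_cons, List.length_cons]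
            omega
    omega
  · intro h
    rw [pvFilterMap_all_some ps gv h]
    simp

theorem pvStepA_char (pd : PySem.Dict String (List String)) (current i : String)
    (g : PySem.Dict String (Option Int)) (q : List String)
    (hnn : ∀ p v, pvGv g p = some v → 0 ≤ v) :
    (current ∈ pvP pd i ∧ pvViolated pd g i ∧
      pvStepA pd current (g, q) i = (g.insert i (some (pvCand pd g i)), q ++ [i]))
    ∨ (¬(current ∈ pvP pd i ∧ pvViolated pd g i) ∧ pvStepA pd current (g, q) i = (g, q)) := by
  unfold pvStepA
  by_cases hc : current ∈ (pd.get? i).getD []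
  · have hcP : current ∈ pvP pd i := hc
    have hne : pvP pd i ≠ [] := List.ne_nil_of_mem hcP
    simp only [hc, if_true]
    by_cases hall : ∀ p ∈ pvP pd i, (pvGv g p).isSome
    · have hlen : (((pd.get? i).getD []).filterMap (fun p => g.getD p none)).length
          = ((pd.get? i).getD []).length :=
        (pvFilterMapLen _ _).mpr hall
      rw [if_pos hlen]
      have hno : ∀ p ∈ (pd.get? i).getD [], ∃ v, g.getD p none = some v ∧ 0 ≤ v := by
        intro p hp
        obtain ⟨v, hv⟩ := Option.isSome_iff_exists.mp (hall p hp)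
        exact ⟨v, hv, hnn p v hv⟩
      have hne' : (pd.get? i).getD [] ≠ [] := hne
      rw [pvMaxBridge _ _ hne' hno]
      have hcand : (((pd.get? i).getD []).map (fun p => (g.getD p none).getD 0)).foldl max 0 + 1
          = pvCand pd g i := by
        unfold pvCand pvP pvGv
        ring
      cases hgi : pvGv g i with
      | none =>
        left
        refine ⟨hcP, ⟨hne, hall, Or.inl hgi⟩, ?_⟩
        have : g.getD i none = none := hgi
        simp only [this]
        rw [hcand]
      | some existing =>
        have : g.getD i none = some existing := hgi
        simp only [this]
        by_cases hlt : existing <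
            (((pd.get? i).getD []).map (fun p => (g.getD p none).getD 0)).foldl max 0 + 1
        · left
          refine ⟨hcP, ⟨hne, hall, Or.inr ⟨existing, hgi, by rw [← hcand]; exact hlt⟩⟩, ?_⟩
          rw [if_pos hlt, hcand]
        · right
          constructor
          · rintro ⟨-, -, -, hv⟩
            rcases hv with h1 | ⟨v, hv, hvc⟩
            · rw [hgi] at h1; simp at h1
            · rw [hgi] at hv
              injection hv with hv'
              subst hv'
              rw [← hcand] at hvc
              exact hlt hvc
          · rw [if_neg hlt]
    · right
      have hlen : (((pd.get? i).getD []).filterMap (fun p => g.getD p none)).length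
          ≠ ((pd.get? i).getD []).length := by
        intro hx
        exact hall ((pvFilterMapLen _ _).mp hx)
      rw [if_neg hlen]
      refine ⟨?_, rfl⟩
      rintro ⟨-, -, h2, -⟩
      exact hall h2
  · right
    simp only [hc, if_false]
    exact ⟨fun h => hc h.1, trivial⟩
-- candidate is bounded by the canonical solution
theorem pvCand_le_gstar (pd : PySem.Dict String (List String)) (dids : List String)
    (g : PySem.Dict String (Option Int)) (i : String) (hi : i ∈ dids)
    (hne : pvP pd i ≠ []) (hall : ∀ p ∈ pvP pd i, (pvGv g p).isSome)
    (hkeys : g.keys = dids)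
    (hub : ∀ p v, pvGv g p = some v → ∃ w, pvGstar pd dids p = some w ∧ v ≤ w) :
    ∃ w, pvGstar pd dids i = some w ∧ pvCand pd g i ≤ w := by
  have hpar : ∀ p ∈ pvP pd i, p ∈ dids ∧
      ∃ v w, pvGv g p = some v ∧ pvGstar pd dids p = some w ∧ v ≤ w := by
    intro p hp
    obtain ⟨v, hv⟩ := Option.isSome_iff_exists.mp (hall p hp)
    obtain ⟨w, hw, hvw⟩ := hub p v hv
    exact ⟨pvMem_of_pvGv_some g dids hkeys p (by simp [hv]), v, w, hv, hw, hvw⟩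
  have hfix := pvGstar_fix pd dids i hi
  unfold pvF at hfix
  rw [if_neg hne] at hfix
  have hcond : (pvP pd i).all (fun p => decide (p ∈ dids) && (pvGstar pd dids p).isSome) = true := by
    apply List.all_eq_true.mpr
    intro p hp
    obtain ⟨hpd, v, w, _, hw, _⟩ := hpar p hp
    simp [hpd, hw]
  rw [if_pos hcond] at hfix
  refine ⟨1 + ((pvP pd i).map (fun p => (pvGstar pd dids p).getD 0)).foldl max 0, hfix.symm, ?_⟩
  unfold pvCand
  have := pvFoldlMax_mono (pvP pd i) (fun p => (pvGv g p).getD 0)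
    (fun p => (pvGstar pd dids p).getD 0) ?_ 0 0 (le_refl 0)
  · omega
  · intro p hp
    obtain ⟨-, v, w, hv, hw, hvw⟩ := hpar p hp
    simp [hv, hw, hvw]

-- replacing one summand in a Nat-valued sum over a Nodup list
theorem pvSum_update (l : List String) (hl : l.Nodup) (i : String) (hi : i ∈ l)
    (f f' : String → Nat) (h : ∀ j ∈ l, j ≠ i → f' j = f j) :
    (l.map f').sum + f i = (l.map f).sum + f' i := by
  induction l with
  | nil => simp at hi
  | cons x t ih =>
    rcases List.mem_cons.mp hi with rfl | hmem
    · have hsame : t.map f' = t.map f := by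
        apply List.map_congr_left
        intro j hj
        exact h j (List.mem_cons_of_mem _ hj)
          (fun hji => (List.nodup_cons.mp hl).1 (hji ▸ hj))
      simp [hsame]
      omega
    · have hx : f' x = f x :=
        h x List.mem_cons_self (fun hxi => (List.nodup_cons.mp hl).1 (hxi ▸ hmem))
      have := ih (List.nodup_cons.mp hl).2 hmem
        (fun j hj hji => h j (List.mem_cons_of_mem _ hj) hji)
      simp only [List.map_cons, List.sum_cons, hx]
      omega

-- a relaxation strictly decreases the potential sum
theorem pvPotSum_relax (pd : PySem.Dict String (List String)) (dids : List String)
    (hnd : dids.Nodup) (g g' : PySem.Dict String (Option Int)) (i : String) (hi : i ∈ dids)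
    (hothers : ∀ j, j ≠ i → pvGv g' j = pvGv g j)
    (hcur : pvCur g i < pvCur g' i) (hcap : pvCur g' i ≤ pvCap pd dids i) :
    pvPotSum pd dids g' + 1 ≤ pvPotSum pd dids g := by
  have := pvSum_update dids hnd i hi (fun j => pvCap pd dids j - pvCur g j)
    (fun j => pvCap pd dids j - pvCur g' j)
    (fun j _ hji => by show pvCap pd dids j - pvCur g' j = pvCap pd dids j - pvCur g j
                       unfold pvCur; rw [hothers j hji])
  unfold pvPotSum
  simp only at this
  omega
-- the inner scan preserves the invariant and does not increase the measure
theorem pvFoldA (pd : PySem.Dict String (List String)) (dids : List String)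
    (hnd : dids.Nodup) (current : String) :
    ∀ (l : List String) (g : PySem.Dict String (Option Int)) (q : List String),
    (∀ i ∈ l, i ∈ dids) →
    g.keys = dids →
    (∀ i v, pvGv g i = some v → ∃ w, pvGstar pd dids i = some w ∧ v ≤ w) →
    (∀ i v, pvGv g i = some v → 0 ≤ v) →
    (∀ i ∈ dids, pvP pd i = [] → pvGv g i = some 0) →
    (∀ p ∈ q, (pvGv g p).isSome) →
    (∀ j ∈ dids, pvViolated pd g j →
      (∃ p ∈ pvP pd j, p ∈ q) ∨ (current ∈ pvP pd j ∧ j ∈ l)) →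
    PvInv pd dids (l.foldl (pvStepA pd current) (g, q)).1
        (l.foldl (pvStepA pd current) (g, q)).2 ∧
      2 * pvPotSum pd dids (l.foldl (pvStepA pd current) (g, q)).1
          + (l.foldl (pvStepA pd current) (g, q)).2.length
        ≤ 2 * pvPotSum pd dids g + q.length := by
  intro l
  induction l with
  | nil =>
    intro g q hl hkeys hub hnn hroot hq hcov
    refine ⟨⟨hkeys, hub, hnn, hroot, hq, ?_⟩, le_refl _⟩
    intro j hj hv
    rcases hcov j hj hv with h | ⟨-, h⟩
    · exact h
    · simp at h
  | cons i t ih =>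
    intro g q hl hkeys hub hnn hroot hq hcov
    have hi : i ∈ dids := hl i List.mem_cons_self
    rcases pvStepA_char pd current i g q hnn with
      ⟨hcP, hviol, heq⟩ | ⟨hnrel, heq⟩
    · -- relaxation at i
      obtain ⟨hne, hall, hthird⟩ := hviol
      obtain ⟨w, hw, hcw⟩ := pvCand_le_gstar pd dids g i hi hne hall hkeys hub
      set cand := pvCand pd g i with hcanddef
      have hcand1 : 1 ≤ cand := by
        have h0 := (PySem.List.le_foldl_max ((pvP pd i).map (fun p => (pvGv g p).getD 0)) 0).1
        unfold pvCand at hcanddef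
        omega
      set g' := g.insert i (some cand) with hg'
      have hgv' : ∀ p, pvGv g' p = if p = i then some cand else pvGv g p :=
        fun p => pvGv_insert g i (some cand) p
      have hkeys' : g'.keys = dids := by
        rw [hg', PySem.Dict.keys_insert_of_contains]
        · exact hkeys
        · rw [PySem.Dict.contains_iff_mem_keys, hkeys]; exact hi
      have hub' : ∀ j v, pvGv g' j = some v → ∃ w', pvGstar pd dids j = some w' ∧ v ≤ w' := by
        intro j v hj
        rw [hgv'] at hj
        by_cases hji : j = i
        · rw [if_pos hji] at hj
          injection hj with hj'
          exact ⟨w, hji ▸ hw, hj' ▸ hcw⟩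
        · rw [if_neg hji] at hj
          exact hub j v hj
      have hnn' : ∀ j v, pvGv g' j = some v → 0 ≤ v := by
        intro j v hj
        rw [hgv'] at hj
        by_cases hji : j = i
        · rw [if_pos hji] at hj; injection hj with hj'; omega
        · rw [if_neg hji] at hj; exact hnn j v hj
      have hroot' : ∀ j ∈ dids, pvP pd j = [] → pvGv g' j = some 0 := by
        intro j hj hrj
        rw [hgv']
        by_cases hji : j = i
        · exact absurd (hji ▸ hrj) hne
        · rw [if_neg hji]; exact hroot j hj hrj
      have hq' : ∀ p ∈ q ++ [i], (pvGv g' p).isSome := by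
        intro p hp
        rw [hgv']
        by_cases hpi : p = i
        · simp [hpi]
        · rw [if_neg hpi]
          rcases List.mem_append.mp hp with h | h
          · exact hq p h
          · simp at h; exact absurd h hpi
      have hcov' : ∀ j ∈ dids, pvViolated pd g' j →
          (∃ p ∈ pvP pd j, p ∈ q ++ [i]) ∨ (current ∈ pvP pd j ∧ j ∈ t) := by
        intro j hj hv'
        by_cases hip : i ∈ pvP pd j
        · exact Or.inl ⟨i, hip, by simp⟩
        · have hsame : ∀ p ∈ pvP pd j, pvGv g' p = pvGv g p := by
            intro p hp
            rw [hgv', if_neg (by intro hpi; subst hpi; exact hip hp)]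
          have hcandsame : pvCand pd g' j = pvCand pd g j := by
            unfold pvCand
            congr 1
            congr 1
            apply List.map_congr_left
            intro p hp
            rw [hsame p hp]
          have hji : j ≠ i := by
            intro hji
            subst hji
            obtain ⟨-, -, hthird'⟩ := hv'
            rw [hgv', if_pos rfl] at hthird'
            rcases hthird' with h1 | ⟨v, hv1, hv2⟩
            · simp at h1
            · injection hv1 with hv1'
              subst hv1'
              rw [hcandsame] at hv2
              exact absurd hv2 (lt_irrefl _)
          have hvold : pvViolated pd g j := by
            obtain ⟨h1, h2, h3⟩ := hv'
            refine ⟨h1, fun p hp => by rw [← hsame p hp]; exact h2 p hp, ?_⟩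
            rw [hgv', if_neg hji] at h3
            rw [hcandsame] at h3
            exact h3
          rcases hcov j hj hvold with ⟨p, hp, hpq⟩ | ⟨h1, h2⟩
          · exact Or.inl ⟨p, hp, List.mem_append.mpr (Or.inl hpq)⟩
          · rcases List.mem_cons.mp h2 with h2' | h2'
            · exact absurd h2' hji
            · exact Or.inr ⟨h1, h2'⟩
      -- measure decrease at the relaxation
      have hcur : pvCur g i < pvCur g' i := by
        unfold pvCur
        rw [hgv', if_pos rfl]
        rcases hthird with h1 | ⟨v, hv1, hv2⟩
        · rw [h1]; simp; omega
        · rw [hv1]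
          have := hnn i v hv1
          simp
          omega
      have hcap : pvCur g' i ≤ pvCap pd dids i := by
        unfold pvCur pvCap
        rw [hgv', if_pos rfl, hw]
        simp
        omega
      have hmeas := pvPotSum_relax pd dids hnd g g' i hi
        (fun j hji => by rw [hgv', if_neg hji]) hcur hcap
      have hfold : (i :: t).foldl (pvStepA pd current) (g, q)
          = t.foldl (pvStepA pd current) (g', q ++ [i]) := by
        rw [List.foldl_cons, heq]
      rw [hfold]
      have := ih g' (q ++ [i]) (fun x hx => hl x (List.mem_cons_of_mem _ hx))
        hkeys' hub' hnn' hroot' hq' hcov'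
      refine ⟨this.1, ?_⟩
      have h2 := this.2
      simp only [List.length_append, List.length_cons, List.length_nil] at h2 ⊢
      omega
    · -- no change at i
      have hfold : (i :: t).foldl (pvStepA pd current) (g, q)
          = t.foldl (pvStepA pd current) (g, q) := by
        rw [List.foldl_cons, heq]
      rw [hfold]
      apply ih g q (fun x hx => hl x (List.mem_cons_of_mem _ hx)) hkeys hub hnn hroot hq
      intro j hj hv
      rcases hcov j hj hv with h | ⟨h1, h2⟩
      · exact Or.inl h
      · rcases List.mem_cons.mp h2 with rfl | h2'
        · exact absurd ⟨h1, hv⟩ hnrel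
        · exact Or.inr ⟨h1, h2'⟩
-- with an empty queue the final state dominates every layer
theorem pvFinal_ge (pd : PySem.Dict String (List String)) (dids : List String)
    (g : PySem.Dict String (Option Int)) (hinv : PvInv pd dids g []) :
    ∀ k, ∀ i ∈ dids, ∀ v, pvLp pd dids k i = some v →
      ∃ u, pvGv g i = some u ∧ v ≤ u := by
  have hnoviol : ∀ i ∈ dids, ¬pvViolated pd g i := by
    intro i hi hv
    obtain ⟨p, -, hp⟩ := hinv.cover i hi hv
    simp at hp
  intro k
  induction k with
  | zero =>
    intro i hi v hv
    rw [pvLp_zero] at hv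
    by_cases hr : pvP pd i = []
    · rw [if_pos hr] at hv
      injection hv with hv'
      exact ⟨0, hinv.root0 i hi hr, by omega⟩
    · rw [if_neg hr] at hv; simp at hv
  | succ k ih =>
    intro i hi v hv
    show ∃ u, pvGv g i = some u ∧ v ≤ u
    have hv' : pvF pd dids (pvLp pd dids k) i = some v := hv
    unfold pvF at hv'
    by_cases hr : pvP pd i = []
    · rw [if_pos hr] at hv'
      injection hv' with hv''
      exact ⟨0, hinv.root0 i hi hr, by omega⟩
    · rw [if_neg hr] at hv'
      by_cases hb : (pvP pd i).all (fun p => decide (p ∈ dids) && (pvLp pd dids k p).isSome) = true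
      · rw [if_pos hb] at hv'
        injection hv' with hv''
        have hpar : ∀ p ∈ pvP pd i, ∃ wp up, pvLp pd dids k p = some wp ∧
            pvGv g p = some up ∧ wp ≤ up := by
          intro p hp
          have hx := List.all_eq_true.mp hb p hp
          by_cases hpd : p ∈ dids
          · simp only [hpd, decide_true, Bool.true_and] at hx
            obtain ⟨wp, hwp⟩ := Option.isSome_iff_exists.mp hx
            obtain ⟨up, hup, hle⟩ := ih p hpd wp hwp
            exact ⟨wp, up, hwp, hup, hle⟩
          · simp [hpd] at hx
        have hall : ∀ p ∈ pvP pd i, (pvGv g p).isSome := by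
          intro p hp
          obtain ⟨-, up, -, hup, -⟩ := hpar p hp
          simp [hup]
        have hnv := hnoviol i hi
        unfold pvViolated at hnv
        push_neg at hnv
        have h3 := hnv hr hall
        have hsome : (pvGv g i).isSome := by
          cases hgi : pvGv g i with
          | none => exact absurd hgi h3.1
          | some u => simp
        obtain ⟨u, hu⟩ := Option.isSome_iff_exists.mp hsome
        refine ⟨u, hu, ?_⟩
        have hnc := h3.2 u hu
        have hmle : ((pvP pd i).map (fun p => (pvLp pd dids k p).getD 0)).foldl max 0
            ≤ ((pvP pd i).map (fun p => (pvGv g p).getD 0)).foldl max 0 := by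
          apply pvFoldlMax_mono _ _ _ ?_ 0 0 (le_refl 0)
          intro p hp
          obtain ⟨wp, up, hwp, hup, hle⟩ := hpar p hp
          simp [hwp, hup, hle]
        unfold pvCand at hnc
        omega
      · rw [if_neg hb] at hv'; simp at hv'

theorem pvFinal_eq (pd : PySem.Dict String (List String)) (dids : List String)
    (g : PySem.Dict String (Option Int)) (hinv : PvInv pd dids g []) :
    ∀ i ∈ dids, pvGv g i = pvGstar pd dids i := by
  intro i hi
  cases hst : pvGstar pd dids i with
  | some w =>
    obtain ⟨u, hu, hle⟩ := pvFinal_ge pd dids g hinv dids.length i hi w hst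
    obtain ⟨w', hw', hle'⟩ := hinv.ubound i u hu
    rw [hst] at hw'
    injection hw' with hww
    rw [hu]
    congr 1
    omega
  | none =>
    cases hgi : pvGv g i with
    | none => rfl
    | some u =>
      obtain ⟨w', hw', -⟩ := hinv.ubound i u hgi
      rw [hst] at hw'
      simp at hw'

-- the while loop, given enough fuel, reaches the canonical solution
theorem pvWhileA_char (pd : PySem.Dict String (List String)) (dids : List String)
    (ids : List String) (hnd : dids.Nodup) (hl : ∀ i ∈ ids, i ∈ dids)
    (hl2 : ∀ i ∈ dids, i ∈ ids) :
    ∀ fuel (g : PySem.Dict String (Option Int)) (q : List String),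
    PvInv pd dids g q → 2 * pvPotSum pd dids g + q.length < fuel →
    (pvWhileA pd ids fuel g q).keys = dids ∧
      ∀ i ∈ dids, pvGv (pvWhileA pd ids fuel g q) i = pvGstar pd dids i := by
  intro fuel
  induction fuel with
  | zero => intro g q _ h; omega
  | succ fuel ih =>
    intro g q hinv hfuel
    cases q with
    | nil =>
      show (pvWhileA pd ids (fuel + 1) g []).keys = dids ∧ _
      unfold pvWhileA
      exact ⟨hinv.keys, pvFinal_eq pd dids g hinv⟩
    | cons current rest =>
      obtain ⟨cv, hcv⟩ := Option.isSome_iff_exists.mp (hinv.qmem current List.mem_cons_self)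
      have hcv' : g.getD current none = some cv := hcv
      unfold pvWhileA
      rw [hcv']
      have hfold := pvFoldA pd dids hnd current ids g rest hl hinv.keys hinv.ubound
        hinv.nonneg hinv.root0 (fun p hp => hinv.qmem p (List.mem_cons_of_mem _ hp)) ?_
      · have hmeas := hfold.2
        apply ih _ _ hfold.1
        simp only [List.length_cons] at hfuel
        omega
      · intro j hj hviol
        obtain ⟨p, hp, hpq⟩ := hinv.cover j hj hviol
        rcases List.mem_cons.mp hpq with rfl | hprest
        · exact Or.inr ⟨hp, hl2 j hj⟩
        · exact Or.inl ⟨p, hp, hprest⟩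
-- closed form of A's initialisation loop
theorem pvInitChar (pd : PySem.Dict String (List String)) :
    ∀ (l : List String) (g : PySem.Dict String (Option Int)) (q : List String),
    (∀ x ∈ l, g.contains x) →
    ((l.foldl (fun (s : PySem.Dict String (Option Int) × List String) i =>
        if ((pd.get? i).getD []).isEmpty then (s.1.insert i (some 0), s.2 ++ [i]) else s)
        (g, q)).1.keys = g.keys
      ∧ (∀ i, pvGv (l.foldl (fun (s : PySem.Dict String (Option Int) × List String) i =>
          if ((pd.get? i).getD []).isEmpty then (s.1.insert i (some 0), s.2 ++ [i]) else s)
          (g, q)).1 i = if i ∈ l ∧ pvP pd i = [] then some 0 else pvGv g i)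
      ∧ (l.foldl (fun (s : PySem.Dict String (Option Int) × List String) i =>
          if ((pd.get? i).getD []).isEmpty then (s.1.insert i (some 0), s.2 ++ [i]) else s)
          (g, q)).2 = q ++ l.filter (fun x => (pvP pd x).isEmpty)) := by
  intro l
  induction l with
  | nil =>
    intro g q _
    refine ⟨rfl, ?_, by simp⟩
    intro i
    simp
  | cons x t ih =>
    intro g q hcont
    by_cases hr : pvP pd x = []
    · have hre : ((pd.get? x).getD []).isEmpty = true := by
        simp only [pvP] at hr; simp [hr]
      have hstep : (x :: t).foldl (fun (s : PySem.Dict String (Option Int) × List String) i =>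
          if ((pd.get? i).getD []).isEmpty then (s.1.insert i (some 0), s.2 ++ [i]) else s) (g, q)
          = t.foldl (fun (s : PySem.Dict String (Option Int) × List String) i =>
          if ((pd.get? i).getD []).isEmpty then (s.1.insert i (some 0), s.2 ++ [i]) else s) (g.insert x (some 0), q ++ [x]) := by
        rw [List.foldl_cons, hre]
        simp
      rw [hstep]
      have hcont' : ∀ y ∈ t, (g.insert x (some 0)).contains y := by
        intro y hy
        rw [PySem.Dict.contains_insert]
        simp [hcont y (List.mem_cons_of_mem _ hy)]
      obtain ⟨hk, hv, hq⟩ := ih (g.insert x (some 0)) (q ++ [x]) hcont'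
      refine ⟨?_, ?_, ?_⟩
      · rw [hk, PySem.Dict.keys_insert_of_contains _ _ (hcont x List.mem_cons_self)]
      · intro i
        rw [hv i, pvGv_insert]
        by_cases hit : i ∈ t ∧ pvP pd i = []
        · simp [hit]
        · rw [if_neg hit]
          by_cases hix : i = x
          · subst hix
            simp [hr]
          · rw [if_neg hix]
            have : ¬(i ∈ x :: t ∧ pvP pd i = []) := by
              rintro ⟨hmem, hroot⟩
              rcases List.mem_cons.mp hmem with h | h
              · exact hix h
              · exact hit ⟨h, hroot⟩
            rw [if_neg this]
      · rw [hq]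
        simp only [List.filter_cons]
        have : (pvP pd x).isEmpty = true := by simp [hr]
        simp [this]
    · have hre : ((pd.get? x).getD []).isEmpty = false := by
        simp only [pvP] at hr
        simpa [List.isEmpty_iff] using hr
      have hstep : (x :: t).foldl (fun (s : PySem.Dict String (Option Int) × List String) i =>
          if ((pd.get? i).getD []).isEmpty then (s.1.insert i (some 0), s.2 ++ [i]) else s) (g, q)
          = t.foldl (fun (s : PySem.Dict String (Option Int) × List String) i =>
          if ((pd.get? i).getD []).isEmpty then (s.1.insert i (some 0), s.2 ++ [i]) else s) (g, q) := by
        rw [List.foldl_cons, hre]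
        simp
      rw [hstep]
      obtain ⟨hk, hv, hq⟩ := ih g q (fun y hy => hcont y (List.mem_cons_of_mem _ hy))
      refine ⟨hk, ?_, ?_⟩
      · intro i
        rw [hv i]
        by_cases hit : i ∈ t ∧ pvP pd i = []
        · have : i ∈ x :: t ∧ pvP pd i = [] := ⟨List.mem_cons_of_mem _ hit.1, hit.2⟩
          simp [hit, this]
        · rw [if_neg hit]
          have : ¬(i ∈ x :: t ∧ pvP pd i = []) := by
            rintro ⟨hmem, hroot⟩
            rcases List.mem_cons.mp hmem with h | h
            · exact hr (h ▸ hroot)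
            · exact hit ⟨h, hroot⟩
          rw [if_neg this]
      · rw [hq]
        simp only [List.filter_cons]
        have : (pvP pd x).isEmpty = false := by
          simpa [List.isEmpty_iff] using hr
        simp [this]

theorem pvGstar_root (pd : PySem.Dict String (List String)) (dids : List String)
    (i : String) (hi : i ∈ dids) (hr : pvP pd i = []) : pvGstar pd dids i = some 0 := by
  have := pvGstar_fix pd dids i hi
  unfold pvF at this
  rw [if_pos hr] at this
  exact this.symm

theorem pvCap_le (pd : PySem.Dict String (List String)) (dids : List String) (i : String) :
    pvCap pd dids i ≤ dids.length + 1 := by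
  unfold pvCap
  cases hst : pvGstar pd dids i with
  | none =>
    show (0 : Nat) ≤ dids.length + 1
    omega
  | some w =>
    show (w + 1).toNat ≤ dids.length + 1
    have := pvLp_bounds pd dids dids.length i w hst
    omega

theorem pvSumMapLe (l : List String) (f : String → Nat) (c : Nat)
    (h : ∀ x ∈ l, f x ≤ c) : (l.map f).sum ≤ l.length * c := by
  induction l with
  | nil => simp
  | cons x t ih =>
    simp only [List.map_cons, List.sum_cons, List.length_cons]
    have := ih (fun y hy => h y (List.mem_cons_of_mem _ hy))
    have := h x List.mem_cons_self
    ring_nf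
    omega

-- the full characterisation of A's result
theorem pvAChar (individual_ids : List String) (parents_of : List (String × List String)) :
    assign_generations_py individual_ids parents_of
      = (PySem.List.dedup individual_ids).map (fun i =>
          (i, pvGstar (PySem.Dict.mk parents_of) (PySem.List.dedup individual_ids) i)) := by
  show (pvWhileA (PySem.Dict.mk parents_of) individual_ids
      (2 * (PySem.List.dedup individual_ids).length * ((PySem.List.dedup individual_ids).length + 1)
        + individual_ids.length + 1)
      (individual_ids.foldl (fun (s : PySem.Dict String (Option Int) × List String) i =>
        if (((PySem.Dict.mk parents_of).get? i).getD []).isEmpty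
        then (s.1.insert i (some 0), s.2 ++ [i]) else s)
        (PySem.Dict.mk ((PySem.List.dedup individual_ids).map (fun i => (i, (none : Option Int)))), [])).1
      (individual_ids.foldl (fun (s : PySem.Dict String (Option Int) × List String) i =>
        if (((PySem.Dict.mk parents_of).get? i).getD []).isEmpty
        then (s.1.insert i (some 0), s.2 ++ [i]) else s)
        (PySem.Dict.mk ((PySem.List.dedup individual_ids).map (fun i => (i, (none : Option Int)))), [])).2).items
      = _
  set pd := PySem.Dict.mk parents_of with hpd
  set dids := PySem.List.dedup individual_ids with hdids
  have hnd : dids.Nodup := PySem.List.nodup_dedup individual_ids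
  have hmem : ∀ i, i ∈ dids ↔ i ∈ individual_ids := fun i => PySem.List.mem_dedup individual_ids i
  set g0 := PySem.Dict.mk (dids.map (fun i => (i, (none : Option Int)))) with hg0
  have hg0keys : g0.keys = dids := by
    rw [hg0]
    show (dids.map (fun i => (i, (none : Option Int)))).map Prod.fst = dids
    rw [List.map_map]
    calc dids.map (Prod.fst ∘ fun i => (i, (none : Option Int)))
        = dids.map id := List.map_congr_left (fun a _ => rfl)
    _ = dids := List.map_id _
  have hg0v : ∀ i, pvGv g0 i = none := by
    intro i
    rw [hg0, pvGv_mkmap]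
    simp
  have hcont : ∀ x ∈ individual_ids, g0.contains x := by
    intro x hx
    rw [PySem.Dict.contains_iff_mem_keys, hg0keys]
    exact (hmem x).mpr hx
  obtain ⟨hk, hv, hq⟩ := pvInitChar pd individual_ids g0 [] hcont
  set st := individual_ids.foldl (fun (s : PySem.Dict String (Option Int) × List String) i =>
      if ((pd.get? i).getD []).isEmpty then (s.1.insert i (some 0), s.2 ++ [i]) else s)
      (g0, []) with hst
  have hkeys : st.1.keys = dids := by rw [hk, hg0keys]
  have hvals : ∀ i, pvGv st.1 i
      = if i ∈ individual_ids ∧ pvP pd i = [] then some 0 else none := by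
    intro i
    rw [hv i, hg0v i]
  have hinv : PvInv pd dids st.1 st.2 := by
    refine ⟨hkeys, ?_, ?_, ?_, ?_, ?_⟩
    · intro i v hiv
      rw [hvals i] at hiv
      by_cases hc : i ∈ individual_ids ∧ pvP pd i = []
      · rw [if_pos hc] at hiv
        injection hiv with hiv'
        refine ⟨0, pvGstar_root pd dids i ((hmem i).mpr hc.1) hc.2, by omega⟩
      · rw [if_neg hc] at hiv; simp at hiv
    · intro i v hiv
      rw [hvals i] at hiv
      by_cases hc : i ∈ individual_ids ∧ pvP pd i = []
      · rw [if_pos hc] at hiv; injection hiv with hiv'; omega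
      · rw [if_neg hc] at hiv; simp at hiv
    · intro i hi hr
      rw [hvals i, if_pos ⟨(hmem i).mp hi, hr⟩]
    · intro p hp
      rw [hq] at hp
      simp only [List.nil_append] at hp
      have := List.of_mem_filter hp
      have hpm := List.mem_of_mem_filter hp
      rw [hvals p, if_pos ⟨hpm, by simpa [List.isEmpty_iff] using this⟩]
      simp
    · intro j hj hviol
      obtain ⟨hne, hall, -⟩ := hviol
      obtain ⟨p, hp⟩ := List.exists_mem_of_ne_nil _ hne
      refine ⟨p, hp, ?_⟩
      have := hall p hp
      rw [hvals p] at this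
      by_cases hc : p ∈ individual_ids ∧ pvP pd p = []
      · rw [hq]
        simp only [List.nil_append]
        apply List.mem_filter.mpr
        exact ⟨hc.1, by simp [hc.2]⟩
      · rw [if_neg hc] at this; simp at this
  have hmeas : 2 * pvPotSum pd dids st.1 + st.2.length
      < 2 * dids.length * (dids.length + 1) + individual_ids.length + 1 := by
    have h1 : pvPotSum pd dids st.1 ≤ dids.length * (dids.length + 1) := by
      unfold pvPotSum
      apply pvSumMapLe
      intro x _
      have := pvCap_le pd dids x
      omega
    have h2 : st.2.length ≤ individual_ids.length := by
      rw [hq]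
      simp only [List.nil_append]
      exact List.length_filter_le _ _
    have h3 : 2 * dids.length * (dids.length + 1)
        = 2 * (dids.length * (dids.length + 1)) := by ring
    rw [h3]
    omega
  obtain ⟨hrkeys, hrvals⟩ := pvWhileA_char pd dids individual_ids hnd
    (fun i hi => (hmem i).mpr hi) (fun i hi => (hmem i).mp hi) _ st.1 st.2 hinv hmeas
  rw [PySem.Dict.items_eq_map_keys _ (by rw [hrkeys]; exact hnd) none, hrkeys]
  apply List.map_congr_left
  intro i hi
  have := hrvals i hi
  unfold pvGv at this
  rw [this]

-- ===== VERDICT (by name: the statement is the Claim_ definition above) =====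
theorem assign_generations_py_spec : Claim_equal_assign_generations_py := by
  intro individual_ids parents_of _
  unfold Spec_assign_generations_py
  rw [pvAChar, pvAltChar]
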